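-- pv_equiv track=rewrite | github.com/gbenson/dom-tokenizers | src/dom_tokenizers/refine_webui_tokens.py | winnow
-- ===== SOURCE A (Python) =====
-- from collections import defaultdict, Counter
--
-- def winnow(inputs, limit=1):
--     bins = defaultdict(list)
--     for text in inputs:
--         bins[text[:limit]].append(text)
--
--     # Multiple bins mean we've not yet found one shared prefix.
--     if len(bins) != 1:
--         next_limit = limit + 1
--         for next_inputs in bins.values():
--             for text in winnow(next_inputs, next_limit):
--                 yield text
--         return
--
--     # One item in one bin means this input is unique.
--     # Two items *might* be one with an '=' or '==', but, whatever?XXX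
--     inputs = next(iter(bins.values()))
--     if len(inputs) > 4:
--         inputs = list(sorted(inputs))
--         lengths = [len(text) for text in inputs]
--         shortest, longest = min(lengths), max(lengths)
--         if lengths == list(range(shortest, longest + 1)):
--             longest_text = inputs[-1]
--             for text in inputs[:-1]:
--                 if not longest_text.startswith(text):
--                     break
--             else:
--                 return
--
--     # Not a pyramid
--     for text in inputs:
--         yield text
-- ===== SOURCE B (Python) =====
-- def winnow(inputs, limit=1):
--     # Partition once by the first `limit` characters, then refine each part
--     # one character at a time with an explicit worklist: a part that no
--     # longer splits is emitted (unless it is a pyramid of one-character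
--     # extensions, which is dropped).
--     bins = {}
--     for text in inputs:
--         bins.setdefault(text[:limit], []).append(text)
--     if len(bins) == 1:
--         return _emit(inputs)
--     out = []
--     stack = [(group, len(key)) for key, group in reversed(list(bins.items()))]
--     while stack:
--         group, pos = stack.pop()
--         sub = {}
--         for text in group:
--             sub.setdefault(text[pos:pos + 1], []).append(text)
--         if len(sub) == 1:
--             out += _emit(group)
--         else:
--             stack += [(g, pos + 1) for _, g in reversed(list(sub.items()))]
--     return out
--
--
-- def _emit(group):
--     # Drop the group when, sorted, it is a chain of one-character extensions.
--     if len(group) > 4: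
--         group = sorted(group)
--         if all(len(b) == len(a) + 1 and b.startswith(a)
--                for a, b in zip(group, group[1:])):
--             return []
--     return group
-- ===== Notes on version B (the rewrite author's own statement) =====
-- stated objective: alternative
-- what changed: Pre_ excludes negative limit, where A's slice text[:limit] counts from the end of each string, outside the helper's prefix-refinement purpose (limit starts at 1 and only grows); B replaces A's recursive generator that re-slices the full prefix at every level by one partition on the first limit characters followed by an explicit worklist that bins on the single next character text[pos:pos+1], and detects pyramids by a pairwise one-character-extension scan over the sorted group.
-- outside the precondition, e.g. on winnow(['', 'a', '', 'ab'], -1): A returns ['', 'a', '', 'ab'], B returns ['', '', 'a', 'ab']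
import Mathlib
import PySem

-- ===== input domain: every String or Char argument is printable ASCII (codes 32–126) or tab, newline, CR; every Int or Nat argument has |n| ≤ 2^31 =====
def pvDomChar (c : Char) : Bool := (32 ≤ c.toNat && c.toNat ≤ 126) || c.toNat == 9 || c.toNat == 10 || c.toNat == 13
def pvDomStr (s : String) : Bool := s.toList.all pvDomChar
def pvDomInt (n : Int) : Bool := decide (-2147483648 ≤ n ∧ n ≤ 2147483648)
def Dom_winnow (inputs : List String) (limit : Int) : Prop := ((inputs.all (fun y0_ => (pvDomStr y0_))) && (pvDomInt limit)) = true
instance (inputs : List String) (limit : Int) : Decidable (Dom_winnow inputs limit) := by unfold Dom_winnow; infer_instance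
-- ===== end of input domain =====

-- B partitions once by the first `limit` characters and then refines with an explicit
-- worklist binning on the single next character, detecting pyramids by a pairwise
-- one-character-extension scan; same return value as A for limit ≥ 0 (Pre_).


-- ===== PORT A =====

-- `bins = defaultdict(list); for text in inputs: bins[text[:limit]].append(text)`
def pvBins (key : String → String) (group : List String) : PySem.Dict String (List String) :=
  group.foldl (fun d text => d.modify (key text) [] (· ++ [text])) PySem.Dict.empty

-- facts about the binning loop, needed for termination of the ports
theorem pvBins_keys (key : String → String) (group : List String) :
    (pvBins key group).keys = PySem.Set.ofList (group.map key) := by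
  have h := PySem.Dict.keys_foldl_modify_key group key [] (fun _ text v => v ++ [text])
      (PySem.Dict.empty (κ := String) (ν := List String))
  rw [PySem.Dict.keys_empty] at h
  rw [PySem.Set.ofList_eq_foldl]
  exact h

theorem pvBins_nodup (key : String → String) (group : List String) :
    (pvBins key group).keys.Nodup := by
  exact PySem.Dict.nodup_keys_foldl_modify_key group key [] (fun _ text v => v ++ [text])
      PySem.Dict.empty (by simp [PySem.Dict.keys_empty])

theorem pvBins_getD (key : String → String) (group : List String) (c : String) :
    (pvBins key group).getD c [] = group.filter (fun t => key t == c) := by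
  have h := PySem.Dict.getD_foldl_modify_append (group.map (fun t => (key t, t))) PySem.Dict.empty c
  rw [List.foldl_map] at h
  simp only [List.filter_map, List.map_map, Function.comp_def] at h
  simpa [pvBins] using h

theorem pvBins_items (key : String → String) (group : List String) :
    (pvBins key group).items =
      (PySem.Set.ofList (group.map key)).map
        (fun c => (c, group.filter (fun t => key t == c))) := by
  rw [PySem.Dict.items_eq_map_keys _ (pvBins_nodup key group) [], pvBins_keys]
  exact List.map_congr_left (fun c _ => by rw [pvBins_getD])

theorem pvBins_size (key : String → String) (group : List String) :
    (pvBins key group).size = (PySem.Set.ofList (group.map key)).length := by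
  show (pvBins key group).items.length = _
  rw [pvBins_items, List.length_map]

theorem pv_exists_ne_of_nodup {α : Type} {l : List α} {c : α}
    (hnd : l.Nodup) (hlen : 2 ≤ l.length) (hc : c ∈ l) : ∃ c' ∈ l, c' ≠ c := by
  match l, hnd with
  | a :: b :: t, hnd =>
    have hab : a ≠ b := by simp [List.nodup_cons] at hnd; tauto
    by_cases hac : a = c
    · exact ⟨b, by simp, by simpa [hac] using hab.symm⟩
    · exact ⟨a, by simp, hac⟩

theorem pvBins_item_len_lt (key : String → String) (group : List String)
    (h : ¬ (pvBins key group).size = 1) {c : String} {v : List String}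
    (hm : (c, v) ∈ (pvBins key group).items) : v.length < group.length := by
  rw [pvBins_items] at hm
  rw [pvBins_size] at h
  obtain ⟨c0, hc0, heq⟩ := List.mem_map.1 hm
  obtain ⟨hc, hv⟩ : c0 = c ∧ group.filter (fun t => key t == c0) = v := by
    constructor
    · exact congrArg Prod.fst heq
    · exact congrArg Prod.snd heq
  subst hc hv
  have hpos := List.length_pos_of_mem hc0
  have h2 : 2 ≤ (PySem.Set.ofList (group.map key)).length := by omega
  obtain ⟨c', hc', hne⟩ := pv_exists_ne_of_nodup (PySem.Set.nodup_ofList _) h2 hc0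
  obtain ⟨t, ht, hkt⟩ := List.mem_map.1 ((PySem.Set.mem_ofList _ _).1 hc')
  refine List.length_filter_lt_length_iff_exists.2 ⟨t, ht, ?_⟩
  simp [hkt, hne]

theorem pvBins_val_len_lt (key : String → String) (group : List String)
    (h : ¬ (pvBins key group).size = 1) {v : List String}
    (hv : v ∈ (pvBins key group).values) : v.length < group.length := by
  have hv' : v ∈ (pvBins key group).items.map (·.2) := hv
  obtain ⟨⟨c, v'⟩, hm, he⟩ := List.mem_map.1 hv'
  cases he
  exact pvBins_item_len_lt key group h hm

-- the tail of A after `inputs = next(iter(bins.values()))`: pyramid test + final yields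
def pvLeaf (inputs : List String) : List String :=
  if 4 < inputs.length then
    let inputs' := PySem.List.sorted inputs (fun x => x) false
    let lengths := inputs'.map (fun text => PySem.Str.len text)
    let shortest := (PySem.List.min? lengths (fun x => x)).getD 0
    let longest := (PySem.List.max? lengths (fun x => x)).getD 0
    if lengths = PySem.List.pyRange shortest (longest + 1) 1 then
      let longestText := (PySem.List.pyGet? inputs' (-1)).getD ""
      if (PySem.List.slice inputs' none (some (-1))).all
          (fun text => PySem.Str.startswith longestText text) then
        []   -- the for/else `return`: a pyramid yields nothing
      else inputs'
    else inputs'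
  else inputs

def winnow (inputs : List String) (limit : Int) : List String :=
  let bins := pvBins (fun text => PySem.Str.slice text none (some limit)) inputs
  if h : ¬ bins.size = 1 then
    (bins.values.attach).flatMap (fun v => winnow v.1 (limit + 1))
  else
    -- next(iter(bins.values())): size = 1, so head exists and getD is unreachable
    pvLeaf (bins.values.head?.getD [])
termination_by inputs.length
decreasing_by
  exact pvBins_val_len_lt _ inputs h v.2

-- ===== PORT B =====

-- Source B `bins.setdefault(k, []).append(t)`: store the extended list back at k's slot
def pvBinsB (key : String → String) (group : List String) : PySem.Dict String (List String) :=
  group.foldl (fun d text => d.insert (key text) (d.getD (key text) [] ++ [text])) PySem.Dict.empty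

-- setdefault-then-append is modify-with-default: the two binning loops coincide
theorem pvBinsB_eq (key : String → String) (group : List String) :
    pvBinsB key group = pvBins key group := rfl

-- facts needed for pvLoopB's termination measure
theorem pv_sum_map_add {α : Type} (S : List α) (f g : α → Nat) :
    (S.map (fun x => f x + g x)).sum = (S.map f).sum + (S.map g).sum := by
  induction S with
  | nil => rfl
  | cons a t ih => simp [ih]; omega

theorem pv_sum_ite_one {S : List α} [DecidableEq α] (hnd : S.Nodup) {a : α} (ha : a ∈ S) :
    (S.map (fun c => if a = c then 1 else 0)).sum = 1 := by
  induction S with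
  | nil => cases ha
  | cons b t ih =>
    rw [List.nodup_cons] at hnd
    rcases List.mem_cons.1 ha with h | h
    · subst h
      have : (t.map (fun c => if a = c then 1 else 0)) = t.map (fun _ => 0) :=
        List.map_congr_left (fun c hc => by
          have : a ≠ c := fun he => hnd.1 (he ▸ hc)
          simp [this])
      simp [this]
    · have hne : a ≠ b := fun he => hnd.1 (he ▸ h)
      simp [hne, ih hnd.2 h]

theorem pv_filter_partition (key : String → String) (group : List String)
    {S : List String} (hnd : S.Nodup) (hsub : ∀ t ∈ group, key t ∈ S) :
    (S.map (fun c => (group.filter (fun t => key t == c)).length)).sum = group.length := by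
  induction group with
  | nil => simp
  | cons t G ih =>
    have hstep : (S.map (fun c => ((t :: G).filter (fun u => key u == c)).length))
        = S.map (fun c => (if key t = c then 1 else 0) + (G.filter (fun u => key u == c)).length) := by
      refine List.map_congr_left (fun c _ => ?_)
      by_cases h : key t = c
      · simp [h]; omega
      · simp [h]
    rw [hstep, pv_sum_map_add, pv_sum_ite_one hnd (hsub t (by simp)),
      ih (fun u hu => hsub u (by simp [hu]))]
    simp [Nat.add_comm]

theorem pvBins_sum_len (key : String → String) (group : List String) :
    ((pvBins key group).items.map (fun p => p.2.length)).sum = group.length := by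
  rw [pvBins_items, List.map_map]
  exact pv_filter_partition key group (PySem.Set.nodup_ofList _)
    (fun t ht => (PySem.Set.mem_ofList _ _).2 (List.mem_map_of_mem ht))

theorem pv_item_mem (key : String → String) (group : List String) {c : String} {v : List String}
    (hm : (c, v) ∈ (pvBins key group).items) :
    c ∈ PySem.Set.ofList (group.map key) ∧ v = group.filter (fun t => key t == c) := by
  rw [pvBins_items] at hm
  obtain ⟨c0, hc0, heq⟩ := List.mem_map.1 hm
  have h1 : c0 = c := congrArg Prod.fst heq
  have h2 : group.filter (fun t => key t == c0) = v := congrArg Prod.snd heq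
  subst h1
  exact ⟨hc0, h2.symm⟩

theorem pvBins_item_ne_nil (key : String → String) (group : List String) {c : String}
    {v : List String} (hm : (c, v) ∈ (pvBins key group).items) : v ≠ [] := by
  obtain ⟨hc, hv⟩ := pv_item_mem key group hm
  obtain ⟨t, ht, hkt⟩ := List.mem_map.1 ((PySem.Set.mem_ofList _ _).1 hc)
  subst hv
  exact List.ne_nil_of_mem (List.mem_filter.2 ⟨ht, by simp [hkt]⟩)

theorem pvBins_size_pos (key : String → String) {group : List String} (h : group ≠ []) :
    (pvBins key group).size ≠ 0 := by
  rw [pvBins_size]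
  intro hz
  rw [List.length_eq_zero_iff] at hz
  obtain ⟨t, ht⟩ := List.exists_mem_of_ne_nil _ h
  have : key t ∈ PySem.Set.ofList (group.map key) :=
    (PySem.Set.mem_ofList _ _).2 (List.mem_map_of_mem ht)
  rw [hz] at this
  cases this

theorem pvBins_empty_of_nil (key : String → String) :
    (pvBins key []).items = [] := by
  rw [pvBins_items]; rfl

theorem pv_loop_measure (items : List (String × List String))
    (hne : ∀ p ∈ items, p.2 ≠ []) :
    ((items.map (fun p => (p.2, (0:Int)))).map (fun e => 2 * e.1.length - 1)).sum + items.length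
      = 2 * (items.map (fun p => p.2.length)).sum := by
  induction items with
  | nil => rfl
  | cons p t ih =>
    have hp : p.2.length ≠ 0 := fun h => hne p (by simp) (List.length_eq_zero_iff.1 h)
    have iht := ih (fun q hq => hne q (by simp [hq]))
    simp only [List.map_cons, List.sum_cons, List.length_cons]
    omega

-- Source B `_emit`: drop the group iff, sorted, it is a chain of one-character extensions
def pvEmitB (group : List String) : List String :=
  if 4 < group.length then
    let g := PySem.List.sorted group (fun x => x) false
    if (g.zip (PySem.List.slice g (some 1) none)).all
        (fun p => (PySem.Str.len p.2 == PySem.Str.len p.1 + 1) && PySem.Str.startswith p.2 p.1) then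
      []
    else g
  else group

-- Source B while-loop: worklist of (group, pos) with group sharing its first pos characters;
-- the Python pops from the end of `stack` and pushes bins reversed, so the net
-- processing order is bin insertion order: modelled as a head-first list.
def pvLoopB (out : List String) (stack : List (List String × Int)) : List String :=
  match stack with
  | [] => out
  | (group, pos) :: rest =>
    let sub := pvBinsB (fun text => PySem.Str.slice text (some pos) (some (pos + 1))) group
    if sub.size = 1 then
      pvLoopB (out ++ pvEmitB group) rest
    else
      pvLoopB out (sub.items.map (fun p => (p.2, pos + 1)) ++ rest)
termination_by ((stack.map (fun e => 2 * e.1.length - 1)).sum, stack.length)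
decreasing_by
  · -- emitted a group: it is nonempty (its sub-binning had one bin), so the sum drops
    apply Prod.Lex.left
    rename_i h
    have hg : group ≠ [] := by
      intro hgn
      subst hgn
      have h0 : sub.size = 0 := rfl
      omega
    have : 1 ≤ group.length := List.length_pos_of_ne_nil hg
    simp only [List.map_cons, List.sum_cons]
    omega
  · -- split a group into ≥ 2 nonempty bins: total weight drops (or the stack shrinks)
    rename_i h
    simp only [pvBinsB_eq]
    by_cases hg : group = []
    · subst hg
      apply Prod.Lex.right'
      · simp [pvBins_empty_of_nil]
      · simp [pvBins_empty_of_nil]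
    · apply Prod.Lex.left
      have hsz' : sub.size ≠ 0 := pvBins_size_pos _ hg
      have hsz : ¬ sub.size = 1 := h
      set key := fun text => PySem.Str.slice text (some pos) (some (pos + 1))
      have h2 : 2 ≤ (pvBins key group).items.length := by
        have he : sub.size = (pvBins key group).items.length := rfl
        omega
      have hsum := pvBins_sum_len key group
      have hmeas := pv_loop_measure (pvBins key group).items
        (by rintro ⟨c, v⟩ hp; exact pvBins_item_ne_nil key group hp)
      have hcast : ((pvBins key group).items.map (fun p => (p.2, pos + 1))).map
            (fun e => 2 * e.1.length - 1)
          = ((pvBins key group).items.map (fun p => (p.2, (0:Int)))).map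
            (fun e => 2 * e.1.length - 1) := by
        simp [List.map_map]
      have hg1 : 1 ≤ group.length := List.length_pos_of_ne_nil hg
      simp only [List.map_append, List.sum_append, List.map_cons, List.sum_cons, hcast]
      omega

def winnow_alt (inputs : List String) (limit : Int) : List String :=
  let bins := pvBinsB (fun text => PySem.Str.slice text none (some limit)) inputs
  if bins.size = 1 then pvEmitB inputs
  else pvLoopB [] (bins.items.map (fun p => (p.2, PySem.Str.len p.1)))

-- ===== PRECONDITION & SPEC =====
-- Pre_ excludes negative limit, on which A still returns a value but text[:limit]
-- counts from the END of each string — outside the helper's prefix-refinement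
-- purpose (limit starts at 1 and only grows); B refines forward by position there.
def Pre_winnow (inputs : List String) (limit : Int) : Prop := 0 ≤ limit
instance (inputs : List String) (limit : Int) : Decidable (Pre_winnow inputs limit) := by unfold Pre_winnow; infer_instance
def pvWitness_winnow : List String × Int := (["ab", "ac", "b"], 1)
def Spec_winnow (inputs : List String) (limit : Int) (out : List String) : Prop := out = winnow_alt inputs limit
instance (inputs : List String) (limit : Int) (out : List String) : Decidable (Spec_winnow inputs limit out) := by unfold Spec_winnow; infer_instance

-- ===== CLAIM (what is proved, stated in full; the proofs are below) =====
def Claim_equal_winnow : Prop := ∀ (inputs : List String) (limit : Int), Dom_winnow inputs limit → Pre_winnow inputs limit → Spec_winnow inputs limit (winnow inputs limit)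

-- ===== LEMMAS AND PROOFS =====

theorem pv_flatMap_attach {α β : Type} (l : List α) (f : α → List β) :
    l.attach.flatMap (fun x => f x.1) = l.flatMap f := by
  calc l.attach.flatMap (fun x => f x.1)
      = (l.attach.map Subtype.val).flatMap f := (List.flatMap_map _ _ _).symm
    _ = l.flatMap f := by rw [List.attach_map_subtype_val]

theorem pv_flatMap_congr {α β : Type} {l : List α} {f g : α → List β}
    (h : ∀ x ∈ l, f x = g x) : l.flatMap f = l.flatMap g := by
  rw [List.flatMap_def, List.flatMap_def, List.map_congr_left h]

theorem pv_values_def (key : String → String) (group : List String) :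
    (pvBins key group).values = (pvBins key group).items.map (·.2) := rfl

theorem pv_single_key {key : String → String} {group : List String}
    (h : (pvBins key group).size = 1) :
    ∃ c, PySem.Set.ofList (group.map key) = [c] ∧ ∀ t ∈ group, key t = c := by
  rw [pvBins_size] at h
  obtain ⟨c, hc⟩ := List.length_eq_one_iff.1 h
  refine ⟨c, hc, fun t ht => ?_⟩
  have hmem : key t ∈ PySem.Set.ofList (group.map key) :=
    (PySem.Set.mem_ofList _ _).2 (List.mem_map_of_mem ht)
  rw [hc] at hmem
  simpa using hmem

theorem pv_single_head {key : String → String} {group : List String}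
    (h : (pvBins key group).size = 1) :
    (pvBins key group).values.head?.getD [] = group := by
  obtain ⟨c, hc, hall⟩ := pv_single_key h
  rw [pv_values_def, pvBins_items, hc]
  simp only [List.map_cons, List.map_nil, List.head?_cons, Option.getD_some]
  exact List.filter_eq_self.2 (fun t ht => by simp [hall t ht])

theorem pv_winnow_leaf (group : List String) (limit : Int)
    (h : (pvBins (fun text => PySem.Str.slice text none (some limit)) group).size = 1) :
    winnow group limit = pvLeaf group := by
  rw [winnow, dif_neg (not_not.2 h), pv_single_head h]

theorem pv_winnow_rec (group : List String) (limit : Int)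
    (h : ¬ (pvBins (fun text => PySem.Str.slice text none (some limit)) group).size = 1) :
    winnow group limit =
      (pvBins (fun text => PySem.Str.slice text none (some limit)) group).items.flatMap
        (fun p => winnow p.2 (limit + 1)) := by
  rw [winnow, dif_pos h,
    pv_flatMap_attach _ (fun v => winnow v (limit + 1)),
    pv_values_def, List.flatMap_map]

theorem pv_nodup_all_eq {α : Type} {l : List α} {a : α}
    (hnd : l.Nodup) (hall : ∀ x ∈ l, x = a) (hmem : a ∈ l) : l = [a] := by
  match l with
  | [] => cases hmem
  | x :: t =>
    have hx : x = a := hall x (by simp)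
    subst hx
    cases t with
    | nil => rfl
    | cons y t' =>
      have hy : y = x := hall y (by simp)
      rw [List.nodup_cons] at hnd
      exact absurd (by simp [hy]) hnd.1

theorem pv_ofList_all_eq {l : List String} {a : String}
    (hne : l ≠ []) (hall : ∀ x ∈ l, x = a) : PySem.Set.ofList l = [a] := by
  have hmem : a ∈ l := by
    cases l with
    | nil => exact absurd rfl hne
    | cons x t => rw [← hall x (by simp)]; simp
  exact pv_nodup_all_eq (PySem.Set.nodup_ofList _)
    (fun x hx => hall x ((PySem.Set.mem_ofList _ _).1 hx))
    ((PySem.Set.mem_ofList _ _).2 hmem)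

theorem pv_winnow_all_eq (v : List String) (s : String) (limit : Int)
    (hne : v ≠ []) (hall : ∀ t ∈ v, t = s) : winnow v limit = pvLeaf v := by
  have hsz : (pvBins (fun t => PySem.Str.slice t none (some limit)) v).size = 1 := by
    rw [pvBins_size,
      pv_ofList_all_eq (by simpa using hne)
        (fun x hx => by
          obtain ⟨t, ht, rfl⟩ := List.mem_map.1 hx
          rw [hall t ht])]
    rfl
  rw [pv_winnow_leaf _ _ hsz]

theorem pv_ofList_map_inj {f : String → String} (hf : Function.Injective f) (l : List String) :
    PySem.Set.ofList (l.map f) = (PySem.Set.ofList l).map f := by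
  rw [PySem.Set.ofList_eq_foldl, PySem.Set.ofList_eq_foldl]
  suffices h : ∀ s : PySem.Set String,
      (l.map f).foldl PySem.Set.add (s.map f) = (l.foldl PySem.Set.add s).map f by
    simpa using h []
  induction l with
  | nil => intro s; simp
  | cons x t ih =>
    intro s
    rw [List.map_cons, List.foldl_cons, List.foldl_cons]
    have hadd : PySem.Set.add (s.map f) (f x) = (PySem.Set.add s x).map f := by
      by_cases hx : x ∈ s
      · have : f x ∈ s.map f := List.mem_map_of_mem hx
        simp [PySem.Set.add, PySem.Set.contains, hx, this]
      · have : ¬ f x ∈ s.map f := by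
          intro hmem
          obtain ⟨y, hy, hyy⟩ := List.mem_map.1 hmem
          exact hx (hf hyy ▸ hy)
        simp [PySem.Set.add, PySem.Set.contains, hx, this]
    rw [hadd, ih]

theorem pv_bins_map_inj {f : String → String} (hf : Function.Injective f)
    (key : String → String) (group : List String) :
    (pvBins (fun t => f (key t)) group).items =
      (pvBins key group).items.map (fun p => (f p.1, p.2)) := by
  rw [pvBins_items, pvBins_items]
  rw [show group.map (fun t => f (key t)) = (group.map key).map f from by
    rw [List.map_map]; rfl]
  rw [pv_ofList_map_inj hf, List.map_map, List.map_map]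
  apply List.map_congr_left
  intro c _
  simp only [Function.comp_apply]
  congr 1
  apply List.filter_congr
  intro t _
  simp [hf.eq_iff]

theorem pvBins_congr {k1 k2 : String → String} {group : List String}
    (h : ∀ t ∈ group, k1 t = k2 t) : pvBins k1 group = pvBins k2 group := by
  unfold pvBins
  exact PySem.List.foldl_congr_mem _ _ _ _ (fun acc x hx => by rw [h x hx])

theorem pv_key_split (u c : String) (m : Nat)
    (hu : PySem.Str.slice u none (some (m : Int)) = c) :
    PySem.Str.slice u none (some ((m : Int) + 1)) =
      c ++ PySem.Str.slice u (some (m : Int)) (some ((m : Int) + 1)) := by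
  have hc : u.toList.take m = c.toList := by
    have h1 := congrArg String.toList hu
    rwa [PySem.Str.toList_slice, PySem.Chars.slice, PySem.List.slice_to_natCast] at h1
  apply String.ext
  rw [String.toList_append, PySem.Str.toList_slice, PySem.Str.toList_slice,
    PySem.Chars.slice, PySem.Chars.slice]
  rw [show ((m : Int) + 1) = ((m + 1 : Nat) : Int) by push_cast; ring]
  rw [PySem.List.slice_to_natCast, PySem.List.slice_natCast]
  rw [show m + 1 - m = 1 from by omega]
  rw [List.take_add_one, hc, List.take_one, List.head?_drop]

theorem pv_append_inj (c : String) : Function.Injective (fun s => c ++ s) := by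
  intro a b h
  apply String.ext
  have := congrArg String.toList h
  rw [String.toList_append, String.toList_append] at this
  exact List.append_cancel_left this

-- the items of A's next-level binning are the items of B's one-character binning,
-- each key prefixed by the shared prefix c
theorem pv_shift_items (g : List String) (pos : Int) (c : String) (hpos : 0 ≤ pos)
    (hc : ∀ t ∈ g, PySem.Str.slice t none (some pos) = c) :
    (pvBins (fun t => PySem.Str.slice t none (some (pos + 1))) g).items =
      (pvBins (fun t => PySem.Str.slice t (some pos) (some (pos + 1))) g).items.map
        (fun p => (c ++ p.1, p.2)) := by
  have hm : pos = ((pos.toNat : Nat) : Int) := (Int.toNat_of_nonneg hpos).symm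
  have hcongr : pvBins (fun t => PySem.Str.slice t none (some (pos + 1))) g
      = pvBins (fun t => c ++ PySem.Str.slice t (some pos) (some (pos + 1))) g := by
    refine pvBins_congr (fun t ht => ?_)
    rw [hm]
    exact pv_key_split t c pos.toNat (by rw [← hm]; exact hc t ht)
  rw [hcongr]
  exact pv_bins_map_inj (pv_append_inj c) _ g

theorem pv_shift_size (g : List String) (pos : Int) (c : String) (hpos : 0 ≤ pos)
    (hc : ∀ t ∈ g, PySem.Str.slice t none (some pos) = c) :
    (pvBins (fun t => PySem.Str.slice t none (some (pos + 1))) g).size =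
      (pvBins (fun t => PySem.Str.slice t (some pos) (some (pos + 1))) g).size := by
  show (pvBins _ g).items.length = (pvBins _ g).items.length
  rw [pv_shift_items g pos c hpos hc, List.length_map]

-- ===== the pyramid test: chain form ↔ A's range-plus-prefix form =====

theorem pv_startswith_iff (s p : String) :
    PySem.Str.startswith s p = true ↔ p.toList <+: s.toList := by
  rw [PySem.Str.startswith_eq]
  exact PySem.Chars.startswith_iff _ _

theorem pv_chain_iff (x : String) (t : List String) :
    ((((x :: t).zip (x :: t).tail).all
        (fun p => (PySem.Str.len p.2 == PySem.Str.len p.1 + 1)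
          && PySem.Str.startswith p.2 p.1)) = true)
    ↔ ((x :: t).map PySem.Str.len
          = PySem.List.pyRange (PySem.Str.len x) (PySem.Str.len x + (1 + (t.length : Int))) 1
        ∧ ∀ u ∈ x :: t, u.toList <+: ((x :: t).getLast (by simp)).toList) := by
  induction t generalizing x with
  | nil =>
    simp [PySem.List.pyRange_one_singleton]
  | cons y t' ih =>
    have hzip : ((x :: y :: t').zip (x :: y :: t').tail)
        = (x, y) :: ((y :: t').zip (y :: t').tail) := rfl
    rw [hzip, List.all_cons, Bool.and_eq_true, ih y]
    have hlast : ((x :: y :: t').getLast (by simp)) = ((y :: t').getLast (by simp)) :=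
      List.getLast_cons _
    constructor
    · rintro ⟨hf, hrange, hpref⟩
      rw [Bool.and_eq_true, beq_iff_eq] at hf
      obtain ⟨hlen, hsw⟩ := hf
      have hswp : x.toList <+: y.toList := (pv_startswith_iff _ _).1 hsw
      refine ⟨?_, ?_⟩
      · rw [List.map_cons, hrange, hlen]
        rw [show PySem.Str.len x + 1 + (1 + ((t'.length : Nat) : Int))
            = PySem.Str.len x + (1 + (((t'.length + 1 : Nat)) : Int)) by push_cast [List.length_cons]; ring]
        rw [← PySem.List.pyRange_one_cons (by push_cast; omega)]
        rfl
      · intro u hu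
        rcases List.mem_cons.1 hu with h | h
        · subst h
          rw [hlast]
          exact hswp.trans (hpref y (by simp))
        · rw [hlast]
          exact hpref u h
    · rintro ⟨hrange, hpref⟩
      -- peel two heads off the range equation
      have hne : PySem.Str.len x < PySem.Str.len x + (1 + ((t'.length + 1 : Nat) : Int)) := by
        push_cast; omega
      simp only [List.length_cons] at hrange
      rw [show (1 + ((t'.length + 1 : Nat) : Int)) = (1 + (t'.length + 1 : Int)) by push_cast; ring]
        at hrange
      rw [List.map_cons, PySem.List.pyRange_one_cons (by omega)] at hrange
      have hhead : PySem.Str.len y :: t'.map PySem.Str.len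
          = PySem.List.pyRange (PySem.Str.len x + 1) (PySem.Str.len x + (1 + (t'.length + 1 : Int))) 1 := by
        have := List.tail_eq_of_cons_eq hrange
        simpa using this
      have hleny : PySem.Str.len y = PySem.Str.len x + 1 := by
        have h2 := hhead
        rw [PySem.List.pyRange_one_cons (by omega)] at h2
        exact List.head_eq_of_cons_eq h2
      have hrange' : (y :: t').map PySem.Str.len
          = PySem.List.pyRange (PySem.Str.len y) (PySem.Str.len y + (1 + (t'.length : Int))) 1 := by
        rw [List.map_cons, hhead, hleny]
        congr 1
        ring
      have hprefy : ∀ u ∈ y :: t', u.toList <+: ((y :: t').getLast (by simp)).toList := by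
        intro u hu
        rw [← hlast]
        exact hpref u (by simp [hu])
      refine ⟨?_, hrange', hprefy⟩
      have hxg : x.toList <+: ((y :: t').getLast (by simp)).toList := by
        rw [← hlast]; exact hpref x (by simp)
      have hyg : y.toList <+: ((y :: t').getLast (by simp)).toList := hprefy y (by simp)
      have hx' := PySem.Str.len_eq x
      have hy' := PySem.Str.len_eq y
      have hswb : x.toList <+: y.toList :=
        List.prefix_of_prefix_length_le hxg hyg (by omega)
      show (PySem.Str.len y == PySem.Str.len x + 1 && PySem.Str.startswith y x) = true
      rw [Bool.and_eq_true, beq_iff_eq]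
      exact ⟨hleny, (pv_startswith_iff _ _).2 hswb⟩

theorem pv_emitB_eq (g : List String) : pvEmitB g = pvLeaf g := by
  rw [pvEmitB, pvLeaf]
  by_cases h4 : 4 < g.length
  · rw [if_pos h4, if_pos h4]
    have hlen : (PySem.List.sorted g (fun x => x) false).length = g.length :=
      PySem.List.length_sorted g (fun x => x) false
    obtain ⟨x, t, hxt⟩ : ∃ x t, PySem.List.sorted g (fun x => x) false = x :: t := by
      cases hs : PySem.List.sorted g (fun x => x) false with
      | nil => rw [hs] at hlen; simp at hlen; omega
      | cons a b => exact ⟨a, b, rfl⟩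
    simp only [hxt, PySem.List.slice_from_one]
    have hlt : t.length = g.length - 1 := by rw [hxt] at hlen; simp at hlen; omega
    -- abbreviations for A's side
    set lengths := (x :: t).map PySem.Str.len with hlengths
    have hlnil : lengths ≠ [] := by simp [hlengths]
    have hlensl : lengths.length = t.length + 1 := by simp [hlengths]
    have hlast : (PySem.List.pyGet? (x :: t) (-1)).getD "" = (x :: t).getLast (by simp) := by
      show PySem.List.pyGetD (x :: t) (-1) "" = _
      exact PySem.List.pyGetD_neg_one _ "" (by simp)
    simp only [PySem.List.slice_to_neg_one, hlast]
    by_cases hch : (((x :: t).zip (x :: t).tail).all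
        (fun p => (PySem.Str.len p.2 == PySem.Str.len p.1 + 1)
          && PySem.Str.startswith p.2 p.1)) = true
    · obtain ⟨hrange, hpref⟩ := (pv_chain_iff x t).1 hch
      rw [if_pos hch]
      -- shortest = len x, longest = len x + t.length
      have hx_mem : PySem.Str.len x ∈ lengths := by simp [hlengths]
      have hM_mem : PySem.Str.len x + (t.length : Int) ∈ lengths := by
        rw [hlengths, hrange, PySem.List.mem_pyRange_one]
        omega
      obtain ⟨m, hm⟩ : ∃ m, PySem.List.min? lengths (fun x => x) = some m := by
        cases h : PySem.List.min? lengths (fun x => x) with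
        | none => exact absurd ((PySem.List.min?_eq_none_iff _ _).1 h) hlnil
        | some m => exact ⟨m, rfl⟩
      obtain ⟨M, hM⟩ : ∃ M, PySem.List.max? lengths (fun x => x) = some M := by
        cases h : PySem.List.max? lengths (fun x => x) with
        | none => exact absurd ((PySem.List.max?_eq_none_iff _ _).1 h) hlnil
        | some M => exact ⟨M, rfl⟩
      have hmv : m = PySem.Str.len x := by
        have h1 := PySem.List.min?_isMin hm _ hx_mem
        have h2 : m ∈ lengths := PySem.List.min?_mem hm
        rw [hlengths, hrange, PySem.List.mem_pyRange_one] at h2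
        omega
      have hMv : M = PySem.Str.len x + (t.length : Int) := by
        have h1 := PySem.List.max?_isMax hM _ hM_mem
        have h2 : M ∈ lengths := PySem.List.max?_mem hM
        rw [hlengths, hrange, PySem.List.mem_pyRange_one] at h2
        omega
      have houter : lengths = PySem.List.pyRange ((PySem.List.min? lengths (fun x => x)).getD 0)
          (((PySem.List.max? lengths (fun x => x)).getD 0) + 1) 1 := by
        rw [hm, hM]
        simp only [Option.getD_some, hmv, hMv]
        rw [hlengths, hrange]
        congr 1
        ring
      rw [if_pos houter]
      have hinner : ((x :: t).dropLast).all
          (fun text => PySem.Str.startswith ((x :: t).getLast (by simp)) text) = true := by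
        rw [List.all_eq_true]
        intro u hu
        exact (pv_startswith_iff _ _).2 (hpref u ((List.dropLast_sublist _).subset hu))
      rw [if_pos hinner]
    · rw [if_neg hch]
      by_cases hA : lengths = PySem.List.pyRange ((PySem.List.min? lengths (fun x => x)).getD 0)
          (((PySem.List.max? lengths (fun x => x)).getD 0) + 1) 1
      · rw [if_pos hA]
        by_cases hall : ((x :: t).dropLast).all
            (fun text => PySem.Str.startswith ((x :: t).getLast (by simp)) text) = true
        · exfalso
          apply hch
          apply (pv_chain_iff x t).2
          set sh := (PySem.List.min? lengths (fun x => x)).getD 0 with hsh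
          set lo := (PySem.List.max? lengths (fun x => x)).getD 0 with hlo
          have hshlt : sh < lo + 1 := by
            by_contra hc
            rw [PySem.List.pyRange_one_eq_nil (by omega)] at hA
            exact hlnil hA
          have hcount : lengths.length = (lo + 1 - sh).toNat := by
            rw [hA, PySem.List.length_pyRange_one]
          have hheadv : PySem.Str.len x = sh := by
            have h2 := hA
            rw [hlengths, List.map_cons, PySem.List.pyRange_one_cons (by omega)] at h2
            exact List.head_eq_of_cons_eq h2
          constructor
          · rw [← hlengths, hA]
            congr 1
            · omega
            · omega
          · intro u hu
            have hsplit : (x :: t).dropLast ++ [(x :: t).getLast (by simp)] = x :: t :=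
              List.dropLast_concat_getLast (by simp)
            rw [← hsplit, List.mem_append] at hu
            rcases hu with hu | hu
            · rw [List.all_eq_true] at hall
              exact (pv_startswith_iff _ _).1 (hall u hu)
            · rw [List.mem_singleton] at hu
              subst hu
              exact List.prefix_refl _
        · rw [if_neg hall]
      · rw [if_neg hA]
  · rw [if_neg h4, if_neg h4]

-- loop invariant: every worklist entry is a nonempty group sharing its first pos chars
def PvInvP (e : List String × Int) : Prop :=
  e.1 ≠ [] ∧ 0 ≤ e.2 ∧ ∃ c, ∀ t ∈ e.1, PySem.Str.slice t none (some e.2) = c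

theorem pv_filter_key {key : String → String} {g : List String} {c : String} {t : String}
    (ht : t ∈ g.filter (fun u => key u == c)) : t ∈ g ∧ key t = c := by
  have h := List.mem_filter.1 ht
  exact ⟨h.1, eq_of_beq h.2⟩

theorem pv_loop_eq : ∀ (out : List String) (stack : List (List String × Int)),
    (∀ e ∈ stack, PvInvP e) →
    pvLoopB out stack = out ++ stack.flatMap (fun e => winnow e.1 (e.2 + 1)) := by
  intro out stack
  induction out, stack using pvLoopB.induct with
  | case1 out =>
    intro _
    simp [pvLoopB]
  | case2 out group pos rest sub hsz ih =>
    intro hinv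
    obtain ⟨hg, hpos, c, hc⟩ := hinv (group, pos) (by simp)
    have hsz' : (pvBinsB (fun text => PySem.Str.slice text (some pos) (some (pos + 1))) group).size = 1 := hsz
    simp only [pvLoopB]
    rw [if_pos hsz']
    rw [ih (fun e he => hinv e (by simp [he]))]
    have hszA : (pvBins (fun t => PySem.Str.slice t none (some (pos + 1))) group).size = 1 := by
      rw [pv_shift_size group pos c hpos hc]
      exact hsz
    rw [List.flatMap_cons, pv_winnow_leaf group (pos + 1) hszA, pv_emitB_eq group,
      List.append_assoc]
  | case3 out group pos rest sub hsz ih =>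
    intro hinv
    obtain ⟨hg, hpos, c, hc⟩ := hinv (group, pos) (by simp)
    have hsz' : ¬ (pvBinsB (fun text => PySem.Str.slice text (some pos) (some (pos + 1))) group).size = 1 := hsz
    simp only [pvLoopB]
    rw [if_neg hsz']
    have hitems := pv_shift_items group pos c hpos hc
    have hinv' : ∀ e ∈ (sub.items.map (fun p => (p.2, pos + 1)) ++ rest), PvInvP e := by
      intro e he
      rcases List.mem_append.1 he with he | he
      · obtain ⟨⟨k, v⟩, hm, heq⟩ := List.mem_map.1 he
        subst heq
        obtain ⟨hkm, hv⟩ := pv_item_mem _ group hm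
        show PvInvP (v, pos + 1)
        unfold PvInvP
        refine ⟨pvBins_item_ne_nil _ group hm, by omega, c ++ k, ?_⟩
        intro u hu
        rw [hv] at hu
        obtain ⟨hug, huk⟩ := pv_filter_key hu
        have hm' : pos = ((pos.toNat : Nat) : Int) := (Int.toNat_of_nonneg hpos).symm
        have hsplit := pv_key_split u c pos.toNat
          (by rw [← hm']; exact hc u hug)
        rw [← hm'] at hsplit
        rw [hsplit, huk]
      · exact hinv e (by simp [he])
    rw [ih hinv']
    have hszA : ¬ (pvBins (fun t => PySem.Str.slice t none (some (pos + 1))) group).size = 1 := by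
      rw [pv_shift_size group pos c hpos hc]
      exact hsz
    rw [List.flatMap_cons, pv_winnow_rec group (pos + 1) hszA, hitems,
      List.flatMap_map, List.flatMap_append, List.flatMap_map]
    rfl

theorem pv_main (inputs : List String) (limit : Int) (hl : 0 ≤ limit) :
    winnow inputs limit = winnow_alt inputs limit := by
  rw [winnow_alt]
  simp only [pvBinsB_eq]
  by_cases hsz : (pvBins (fun t => PySem.Str.slice t none (some limit)) inputs).size = 1
  · rw [if_pos hsz, pv_winnow_leaf _ _ hsz, pv_emitB_eq]
  · rw [if_neg hsz, pv_winnow_rec _ _ hsz]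
    have hinv : ∀ e ∈ (pvBins (fun t => PySem.Str.slice t none (some limit)) inputs).items.map
        (fun p => (p.2, PySem.Str.len p.1)), PvInvP e := by
      intro e he
      obtain ⟨⟨k, v⟩, hm, heq⟩ := List.mem_map.1 he
      subst heq
      obtain ⟨hkm, hv⟩ := pv_item_mem _ inputs hm
      have hklen := PySem.Str.len_eq k
      show PvInvP (v, PySem.Str.len k)
      unfold PvInvP
      refine ⟨pvBins_item_ne_nil _ inputs hm, by omega, k, ?_⟩
      intro u hu
      rw [hv] at hu
      obtain ⟨hug, huk⟩ := pv_filter_key hu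
      -- u[:len k] = k, since u[:limit] = k and len k ≤ limit
      have htake : u.toList.take limit.toNat = k.toList := by
        have h1 := congrArg String.toList huk
        rwa [PySem.Str.toList_slice, PySem.Chars.slice,
          show limit = ((limit.toNat : Nat) : Int) from (Int.toNat_of_nonneg hl).symm,
          PySem.List.slice_to_natCast] at h1
      have hkle : k.toList.length ≤ limit.toNat := by
        have := congrArg List.length htake
        rw [List.length_take] at this
        omega
      apply String.ext
      rw [PySem.Str.toList_slice, PySem.Chars.slice,
        show PySem.Str.len k = ((k.toList.length : Nat) : Int) from by rw [hklen],
        PySem.List.slice_to_natCast]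
      calc u.toList.take k.toList.length
          = u.toList.take (min k.toList.length limit.toNat) := by rw [min_eq_left hkle]
        _ = (u.toList.take limit.toNat).take k.toList.length := List.take_take.symm
        _ = k.toList.take k.toList.length := by rw [htake]
        _ = k.toList := List.take_length
    rw [pv_loop_eq [] _ hinv, List.nil_append, List.flatMap_map]
    apply pv_flatMap_congr
    rintro ⟨k, v⟩ hm
    obtain ⟨hkm, hv⟩ := pv_item_mem _ inputs hm
    have hne := pvBins_item_ne_nil _ inputs hm
    by_cases hkl : PySem.Str.len k = limit
    · show winnow v (limit + 1) = winnow v (PySem.Str.len k + 1)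
      rw [hkl]
    · -- the bin's key is shorter than limit: all its members equal the key
      have hall : ∀ t ∈ v, t = k := by
        intro t ht
        rw [hv] at ht
        obtain ⟨htg, htk⟩ := pv_filter_key ht
        have htake : t.toList.take limit.toNat = k.toList := by
          have h1 := congrArg String.toList htk
          rwa [PySem.Str.toList_slice, PySem.Chars.slice,
            show limit = ((limit.toNat : Nat) : Int) from (Int.toNat_of_nonneg hl).symm,
            PySem.List.slice_to_natCast] at h1
        have hklen := PySem.Str.len_eq k
        have hlen2 := congrArg List.length htake
        rw [List.length_take] at hlen2
        have hshort : t.toList.length ≤ limit.toNat := by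
          by_contra hcon
          apply hkl
          rw [hklen]
          omega
        apply String.ext
        rw [← htake, List.take_of_length_le hshort]
      show winnow v (limit + 1) = winnow v (PySem.Str.len k + 1)
      rw [pv_winnow_all_eq v k _ hne hall, pv_winnow_all_eq v k _ hne hall]

-- ===== VERDICT (by name: the statement is the Claim_ definition above) =====
theorem winnow_spec : Claim_equal_winnow := by
  intro inputs limit _ hpre
  show winnow inputs limit = winnow_alt inputs limit
  exact pv_main inputs limit hpre
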